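-- pv_equiv track=rewrite | github.com/Harshitha172000/FLOORPLANNING | Floorplan (3).py | H1_dimension
-- ===== SOURCE A (Python) =====
-- def H1_dimension(block1,block2,block_dimensions,sizes, combined_size):
--
--
--   w1s= block_dimensions[block1-1][1::2]
--   h1s= block_dimensions[block1-1][2::2]
--   w2s= block_dimensions[block2-1][1::2]
--   h2s= block_dimensions[block2-1][2::2]
--
--
--   areas=[]
--   temp=[]
--   for i in range(len(w1s)):
--     temp=[]
--     for j in range(len(w1s)):
--       temp.append(max(w1s[i],w2s[j])*(h1s[i]+h2s[j]))
--     areas.append(temp)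
--
--   min=areas[0][0]
--   h=0;k=0;
--   for i in range(len(areas)):
--     for j in range(len(areas)):
--
--        if (areas[i][j]<min):
--            min=areas[i][j]
--            h=i
--            k=j
--
--   w2=w2s[k]
--   h1=h1s[h]
--   h2=h2s[k]
--   w1=w1s[h]
--
--   t=[ w1, h1]
--   sizes.append(t)
--
--   q=[ w2, h2]
--   sizes.append(q)
--
--   dim=[]
--   dim.append(max(w1,w2))
--   dim.append(h1+h2)
--   combined_size.append(t)
--   combined_size.append(q)
--   combined_size.append([max(w1,w2), h1+h2])
--
--   return (dim, sizes, combined_size)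
-- ===== SOURCE B (Python) =====
-- def H1_dimension(block1, block2, block_dimensions, sizes, combined_size):
--     row1 = block_dimensions[block1 - 1]
--     row2 = block_dimensions[block2 - 1]
--     w1s, h1s = row1[1::2], row1[2::2]
--     w2s, h2s = row2[1::2], row2[2::2]
--     n = len(w1s)
--     pairs1 = list(zip(w1s, h1s))[:n]
--     pairs2 = list(zip(w2s, h2s))[:n]
--     # single fused pass: no areas matrix, no index bookkeeping; track the best pair of (w,h) pairs
--     best = (max(w1s[0], w2s[0]) * (h1s[0] + h2s[0]), pairs1[0], pairs2[0])
--     for p in pairs1: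
--         for q in pairs2:
--             a = max(p[0], q[0]) * (p[1] + q[1])
--             if a < best[0]:
--                 best = (a, p, q)
--     (w1, h1), (w2, h2) = best[1], best[2]
--     t = [w1, h1]
--     q2 = [w2, h2]
--     sizes.append(t)
--     sizes.append(q2)
--     dim = [max(w1, w2), h1 + h2]
--     combined_size.extend([t, q2, dim])
--     return (dim, sizes, combined_size)
-- ===== Notes on version B (the rewrite author's own statement) =====
-- stated objective: alternative
-- what changed: B replaces A's build-the-full-areas-matrix-then-scan-it-with-index-bookkeeping by a single fused pass over the zipped (width,height) pairs of the two blocks, tracking the best value and the best pair of pairs directly (no matrix, no h/k indices, no re-indexing at the end).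
import Mathlib
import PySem

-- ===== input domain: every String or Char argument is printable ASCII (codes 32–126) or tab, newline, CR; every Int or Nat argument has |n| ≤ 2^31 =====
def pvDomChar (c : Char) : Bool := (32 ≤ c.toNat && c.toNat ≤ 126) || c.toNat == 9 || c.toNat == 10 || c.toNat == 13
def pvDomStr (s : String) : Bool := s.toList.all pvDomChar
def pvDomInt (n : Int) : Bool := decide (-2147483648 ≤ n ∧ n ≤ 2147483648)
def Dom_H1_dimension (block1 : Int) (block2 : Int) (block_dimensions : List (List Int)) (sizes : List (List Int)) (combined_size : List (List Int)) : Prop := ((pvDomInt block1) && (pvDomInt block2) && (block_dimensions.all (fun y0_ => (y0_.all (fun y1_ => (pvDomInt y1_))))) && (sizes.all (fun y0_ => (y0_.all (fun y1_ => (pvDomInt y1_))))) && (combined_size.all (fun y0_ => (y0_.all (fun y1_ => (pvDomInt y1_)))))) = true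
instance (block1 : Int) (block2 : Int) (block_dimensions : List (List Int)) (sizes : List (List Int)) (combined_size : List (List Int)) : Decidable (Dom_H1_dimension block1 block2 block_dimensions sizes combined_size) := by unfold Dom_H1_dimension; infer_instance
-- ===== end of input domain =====

-- B replaces A's build-the-areas-matrix-then-scan-it by one fused pass over the zipped (w,h) pairs,
-- tracking the best value and pair of pairs directly (no matrix, no index bookkeeping); like A, it
-- appends to `sizes`/`combined_size` in place in Python (the theorems are about the return value).
-- ===== PORT A =====
-- shared slice prelude: Python's row[1::2] and row[2::2]
def pvOdds (row : List Int) : List Int := (PySem.List.slice? row (some 1) none 2).getD []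
def pvEvens (row : List Int) : List Int := (PySem.List.slice? row (some 2) none 2).getD []

-- A after the slices: build the full areas matrix, scan it for the strict row-major minimum, assemble result
def pvCoreA (w1s h1s w2s h2s : List Int) (sizes combined_size : List (List Int)) :
    List Int × List (List Int) × List (List Int) :=
  let areas := (PySem.List.pyRange 0 (w1s.length : Int) 1).foldl (fun areas i =>
      areas ++ [(PySem.List.pyRange 0 (w1s.length : Int) 1).foldl (fun temp j =>
        temp ++ [max (PySem.List.pyGetD w1s i 0) (PySem.List.pyGetD w2s j 0) *
                 (PySem.List.pyGetD h1s i 0 + PySem.List.pyGetD h2s j 0)]) []]) []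
  let st := (PySem.List.pyRange 0 (areas.length : Int) 1).foldl (fun s i =>
      (PySem.List.pyRange 0 (areas.length : Int) 1).foldl (fun s j =>
        if PySem.List.pyGetD (PySem.List.pyGetD areas i []) j 0 < s.1 then
          (PySem.List.pyGetD (PySem.List.pyGetD areas i []) j 0, i, j)
        else s) s)
      (PySem.List.pyGetD (PySem.List.pyGetD areas 0 []) 0 0, 0, 0)
  let w2 := PySem.List.pyGetD w2s st.2.2 0
  let h1 := PySem.List.pyGetD h1s st.2.1 0
  let h2 := PySem.List.pyGetD h2s st.2.2 0
  let w1 := PySem.List.pyGetD w1s st.2.1 0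
  let t := [w1, h1]
  let q := [w2, h2]
  ([max w1 w2, h1 + h2], sizes ++ [t] ++ [q],
   combined_size ++ [t] ++ [q] ++ [[max w1 w2, h1 + h2]])

def H1_dimension (block1 : Int) (block2 : Int) (block_dimensions : List (List Int)) (sizes : List (List Int)) (combined_size : List (List Int)) : List Int × List (List Int) × List (List Int) :=
  pvCoreA (pvOdds (PySem.List.pyGetD block_dimensions (block1 - 1) []))
          (pvEvens (PySem.List.pyGetD block_dimensions (block1 - 1) []))
          (pvOdds (PySem.List.pyGetD block_dimensions (block2 - 1) []))
          (pvEvens (PySem.List.pyGetD block_dimensions (block2 - 1) []))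
          sizes combined_size

-- ===== PORT B =====
-- B after the slices: one fused pass over zipped (w,h) pairs; no matrix, no index bookkeeping
def pvCoreB (w1s h1s w2s h2s : List Int) (sizes combined_size : List (List Int)) :
    List Int × List (List Int) × List (List Int) :=
  let n := w1s.length
  let pairs1 := (w1s.zip h1s).take n
  let pairs2 := (w2s.zip h2s).take n
  let best := pairs1.foldl (fun best p =>
      pairs2.foldl (fun best q =>
        if max p.1 q.1 * (p.2 + q.2) < best.1 then (max p.1 q.1 * (p.2 + q.2), p, q) else best) best)
    (max (PySem.List.pyGetD w1s 0 0) (PySem.List.pyGetD w2s 0 0) *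
       (PySem.List.pyGetD h1s 0 0 + PySem.List.pyGetD h2s 0 0),
     PySem.List.pyGetD pairs1 0 (0, 0), PySem.List.pyGetD pairs2 0 (0, 0))
  let w1 := best.2.1.1
  let h1 := best.2.1.2
  let w2 := best.2.2.1
  let h2 := best.2.2.2
  let t := [w1, h1]
  let q2 := [w2, h2]
  let dim := [max w1 w2, h1 + h2]
  (dim, sizes ++ [t] ++ [q2], combined_size ++ [t, q2, dim])

def H1_dimension_alt (block1 : Int) (block2 : Int) (block_dimensions : List (List Int)) (sizes : List (List Int)) (combined_size : List (List Int)) : List Int × List (List Int) × List (List Int) :=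
  pvCoreB (pvOdds (PySem.List.pyGetD block_dimensions (block1 - 1) []))
          (pvEvens (PySem.List.pyGetD block_dimensions (block1 - 1) []))
          (pvOdds (PySem.List.pyGetD block_dimensions (block2 - 1) []))
          (pvEvens (PySem.List.pyGetD block_dimensions (block2 - 1) []))
          sizes combined_size

-- ===== PRECONDITION & SPEC =====
-- Pre_ = exactly the inputs where A returns: both row lookups in range, at least one (w,h) pair in
-- block1's row, and the other three slices at least as long as the width slice of block1's row
-- (otherwise A raises IndexError while building or scanning the areas matrix).
def Pre_H1_dimension (block1 : Int) (block2 : Int) (block_dimensions : List (List Int)) (sizes : List (List Int)) (combined_size : List (List Int)) : Prop :=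
  let w1s := pvOdds (PySem.List.pyGetD block_dimensions (block1 - 1) [])
  let h1s := pvEvens (PySem.List.pyGetD block_dimensions (block1 - 1) [])
  let w2s := pvOdds (PySem.List.pyGetD block_dimensions (block2 - 1) [])
  let h2s := pvEvens (PySem.List.pyGetD block_dimensions (block2 - 1) [])
  PySem.Raise.InRange block_dimensions.length (block1 - 1) ∧
  PySem.Raise.InRange block_dimensions.length (block2 - 1) ∧
  0 < w1s.length ∧ w1s.length ≤ h1s.length ∧ w1s.length ≤ w2s.length ∧ w1s.length ≤ h2s.length

instance (block1 : Int) (block2 : Int) (block_dimensions : List (List Int)) (sizes : List (List Int)) (combined_size : List (List Int)) : Decidable (Pre_H1_dimension block1 block2 block_dimensions sizes combined_size) := by unfold Pre_H1_dimension; infer_instance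

def pvWitness_H1_dimension : Int × Int × List (List Int) × List (List Int) × List (List Int) :=
  (1, 1, [[0, 3, 4]], [], [])

def Spec_H1_dimension (block1 : Int) (block2 : Int) (block_dimensions : List (List Int)) (sizes : List (List Int)) (combined_size : List (List Int)) (out : List Int × List (List Int) × List (List Int)) : Prop := out = H1_dimension_alt block1 block2 block_dimensions sizes combined_size
instance (block1 : Int) (block2 : Int) (block_dimensions : List (List Int)) (sizes : List (List Int)) (combined_size : List (List Int)) (out : List Int × List (List Int) × List (List Int)) : Decidable (Spec_H1_dimension block1 block2 block_dimensions sizes combined_size out) := by unfold Spec_H1_dimension; infer_instance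

-- ===== CLAIM (what is proved, stated in full; the proofs are below) =====
def Claim_equal_H1_dimension : Prop := ∀ (block1 : Int) (block2 : Int) (block_dimensions : List (List Int)) (sizes : List (List Int)) (combined_size : List (List Int)), Dom_H1_dimension block1 block2 block_dimensions sizes combined_size → Pre_H1_dimension block1 block2 block_dimensions sizes combined_size → Spec_H1_dimension block1 block2 block_dimensions sizes combined_size (H1_dimension block1 block2 block_dimensions sizes combined_size)

-- ===== LEMMAS AND PROOFS =====

-- the area value A stores at matrix cell (i, j) and B computes on the fly
def pvVal (w1s h1s w2s h2s : List Int) (i j : Int) : Int :=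
  max (PySem.List.pyGetD w1s i 0) (PySem.List.pyGetD w2s j 0) *
    (PySem.List.pyGetD h1s i 0 + PySem.List.pyGetD h2s j 0)

-- the (w, h) pair at index i of a zipped slice pair
def pvP (ws hs : List Int) (i : Int) : Int × Int :=
  (PySem.List.pyGetD ws i 0, PySem.List.pyGetD hs i 0)

-- maps A's scan state (min, h, k) to B's scan state (best, pair1, pair2)
def pvG (w1s h1s w2s h2s : List Int) (s : Int × Int × Int) : Int × (Int × Int) × (Int × Int) :=
  (s.1, pvP w1s h1s s.2.1, pvP w2s h2s s.2.2)

lemma zip_take_eq_map_range (xs ys : List Int) (m : Nat) (hx : m ≤ xs.length) (hy : m ≤ ys.length) :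
    (xs.zip ys).take m
      = (PySem.List.pyRange 0 (m : Int) 1).map (fun i => pvP xs ys i) := by
  apply List.ext_getElem
  · simp [PySem.List.length_pyRange_one]; omega
  · intro k h1 h2
    have hk : k < m := by simp [PySem.List.length_pyRange_one] at h2; omega
    simp [List.getElem_take, List.getElem_zip, PySem.List.getElem_pyRange_one, pvP,
      Nat.lt_of_lt_of_le hk hx, Nat.lt_of_lt_of_le hk hy]

lemma inner_comm (w1s h1s w2s h2s : List Int) (l2 : List Int) (i : Int) (s : Int × Int × Int) :
    pvG w1s h1s w2s h2s (l2.foldl (fun s j =>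
        if pvVal w1s h1s w2s h2s i j < s.1 then (pvVal w1s h1s w2s h2s i j, i, j) else s) s)
      = l2.foldl (fun s j =>
          if max (pvP w1s h1s i).1 (pvP w2s h2s j).1 * ((pvP w1s h1s i).2 + (pvP w2s h2s j).2) < s.1
          then (max (pvP w1s h1s i).1 (pvP w2s h2s j).1 * ((pvP w1s h1s i).2 + (pvP w2s h2s j).2),
                pvP w1s h1s i, pvP w2s h2s j)
          else s) (pvG w1s h1s w2s h2s s) := by
  induction l2 generalizing s with
  | nil => rfl
  | cons j l ih =>
      simp only [List.foldl_cons]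
      rw [ih]
      congr 1
      simp only [pvVal, pvP, pvG]
      split <;> rfl

lemma scan_comm (w1s h1s w2s h2s : List Int) (l1 l2 : List Int) (s : Int × Int × Int) :
    pvG w1s h1s w2s h2s (l1.foldl (fun s i => l2.foldl (fun s j =>
        if pvVal w1s h1s w2s h2s i j < s.1 then (pvVal w1s h1s w2s h2s i j, i, j) else s) s) s)
      = l1.foldl (fun s i => l2.foldl (fun s j =>
          if max (pvP w1s h1s i).1 (pvP w2s h2s j).1 * ((pvP w1s h1s i).2 + (pvP w2s h2s j).2) < s.1
          then (max (pvP w1s h1s i).1 (pvP w2s h2s j).1 * ((pvP w1s h1s i).2 + (pvP w2s h2s j).2),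
                pvP w1s h1s i, pvP w2s h2s j)
          else s) s) (pvG w1s h1s w2s h2s s) := by
  induction l1 generalizing s with
  | nil => rfl
  | cons i l ih => simp only [List.foldl_cons]; rw [ih, inner_comm]

lemma scanA_eq (w1s h1s w2s h2s : List Int) (s0 : Int × Int × Int) :
    (PySem.List.pyRange 0 (w1s.length : Int) 1).foldl (fun s i =>
        (PySem.List.pyRange 0 (w1s.length : Int) 1).foldl (fun s j =>
          if PySem.List.pyGetD (PySem.List.pyGetD
                ((PySem.List.pyRange 0 (w1s.length : Int) 1).map (fun i =>
                  (PySem.List.pyRange 0 (w1s.length : Int) 1).map (fun j =>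
                    max (PySem.List.pyGetD w1s i 0) (PySem.List.pyGetD w2s j 0) *
                      (PySem.List.pyGetD h1s i 0 + PySem.List.pyGetD h2s j 0)))) i []) j 0 < s.1 then
            (PySem.List.pyGetD (PySem.List.pyGetD
                ((PySem.List.pyRange 0 (w1s.length : Int) 1).map (fun i =>
                  (PySem.List.pyRange 0 (w1s.length : Int) 1).map (fun j =>
                    max (PySem.List.pyGetD w1s i 0) (PySem.List.pyGetD w2s j 0) *
                      (PySem.List.pyGetD h1s i 0 + PySem.List.pyGetD h2s j 0)))) i []) j 0, i, j)
          else s) s) s0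
    = (PySem.List.pyRange 0 (w1s.length : Int) 1).foldl (fun s i =>
        (PySem.List.pyRange 0 (w1s.length : Int) 1).foldl (fun s j =>
          if pvVal w1s h1s w2s h2s i j < s.1 then (pvVal w1s h1s w2s h2s i j, i, j) else s) s) s0 := by
  apply PySem.List.foldl_congr_mem
  intro s i hi
  apply PySem.List.foldl_congr_mem
  intro s j hj
  obtain ⟨hi0, hiN⟩ := (PySem.List.mem_pyRange_one).mp hi
  obtain ⟨hj0, hjN⟩ := (PySem.List.mem_pyRange_one).mp hj
  rw [PySem.List.pyGetD_map_pyRange_of_nonneg _ _ _ _ hi0 hiN,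
      PySem.List.pyGetD_map_pyRange_of_nonneg _ _ _ _ hj0 hjN]
  rfl

theorem core_eq (w1s h1s w2s h2s : List Int) (sizes cs : List (List Int))
    (h0 : 0 < w1s.length) (hh1 : w1s.length ≤ h1s.length)
    (hw2 : w1s.length ≤ w2s.length) (hh2 : w1s.length ≤ h2s.length) :
    pvCoreA w1s h1s w2s h2s sizes cs = pvCoreB w1s h1s w2s h2s sizes cs := by
  have h0' : (0 : Int) < (w1s.length : Int) := by exact_mod_cast h0
  unfold pvCoreA pvCoreB
  simp only [PySem.List.foldl_append_singleton_eq_map, List.nil_append,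
    List.length_map, PySem.List.length_pyRange_one, Int.sub_zero, Int.toNat_natCast]
  rw [zip_take_eq_map_range w1s h1s w1s.length le_rfl hh1,
      zip_take_eq_map_range w2s h2s w1s.length hw2 hh2]
  rw [PySem.List.pyGetD_map_pyRange_of_nonneg _ _ _ _ le_rfl h0',
      PySem.List.pyGetD_map_pyRange_of_nonneg (fun i => pvP w1s h1s i) _ _ _ le_rfl h0',
      PySem.List.pyGetD_map_pyRange_of_nonneg (fun i => pvP w2s h2s i) _ _ _ le_rfl h0']
  rw [scanA_eq]
  simp only [List.foldl_map]
  rw [show (PySem.List.pyGetD ((PySem.List.pyRange 0 ((w1s.length:Int)) 1).map (fun j =>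
        max (PySem.List.pyGetD w1s 0 0) (PySem.List.pyGetD w2s j 0) *
          (PySem.List.pyGetD h1s 0 0 + PySem.List.pyGetD h2s j 0))) 0 0)
      = pvVal w1s h1s w2s h2s 0 0 from
    PySem.List.pyGetD_map_pyRange_of_nonneg _ _ _ _ le_rfl h0']
  rw [show (max (PySem.List.pyGetD w1s 0 0) (PySem.List.pyGetD w2s 0 0) *
        (PySem.List.pyGetD h1s 0 0 + PySem.List.pyGetD h2s 0 0),
      pvP w1s h1s 0, pvP w2s h2s 0)
      = pvG w1s h1s w2s h2s (pvVal w1s h1s w2s h2s 0 0, 0, 0) from rfl]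
  rw [← scan_comm]
  simp [pvG, pvP]

theorem H1_dimension_spec : Claim_equal_H1_dimension := by
  intro block1 block2 bd sizes cs _ hpre
  obtain ⟨_, _, h0, hh1, hw2, hh2⟩ := hpre
  show H1_dimension block1 block2 bd sizes cs = H1_dimension_alt block1 block2 bd sizes cs
  exact core_eq _ _ _ _ _ _ h0 hh1 hw2 hh2
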